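-- pv_equiv track=rewrite | github.com/pypi-data/pypi-mirror-29 | packages/Inukshuk/Inukshuk-0.1.2-py3-none-any.whl/inukshuk/lexer.py | rule_number
-- ===== SOURCE A (Python) =====
-- TOKEN_ID_INTEGER = 7
--
-- TOKEN_ID_FLOAT = 8
--
-- def rule_number(text, index, text_len, is_in_inukshuk):
--     if is_in_inukshuk:
--         o = ord(text[index])
--
--         # [0-9]
--         if (48 <= o <= 57):
--             index += 1
--
--             # [0-9]
--             while index < text_len:
--                 o = ord(text[index])
--                 if not (48 <= o <= 57):
--                     break
--                 index += 1
--
--             tid = TOKEN_ID_INTEGER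
--
--             # Is it a float? (look for a `.`)
--             if index < text_len - 1 and text[index] == '.':
--                 after_dot = ord(text[index + 1])
--                 if 48 <= after_dot <= 57:
--                     # It's a float! Consume the decimals.
--                     index += 1
--                     tid = TOKEN_ID_FLOAT
--                     while index < text_len:
--                         o = ord(text[index])
--                         if not (48 <= o <= 57):
--                             break
--                         index += 1
--
--             return (tid, index)
--
--     return None
-- ===== SOURCE B (Python) =====
-- TOKEN_ID_INTEGER = 7
--
-- TOKEN_ID_FLOAT = 8
--
-- _DIGITS = '0123456789'
--
-- # Pre_ excludes negative or out-of-range index and negative or oversize text_len: those are outside the lexer's natural domain (A raises IndexError on out-of-range positions and otherwise relies on Python's negative-index/negative-slice wraparound).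
-- def rule_number(text, index, text_len, is_in_inukshuk):
--     if not is_in_inukshuk:
--         return None
--     s = text[index:text_len]
--     d1 = len(s) - len(s.lstrip(_DIGITS))
--     if d1 == 0:
--         return None
--     rest = s[d1:]
--     if rest[:1] == '.':
--         tail = rest[1:]
--         d2 = len(tail) - len(tail.lstrip(_DIGITS))
--         if d2 > 0:
--             return (TOKEN_ID_FLOAT, index + d1 + 1 + d2)
--     return (TOKEN_ID_INTEGER, index + d1)
-- ===== Notes on version B (the rewrite author's own statement) =====
-- stated objective: idiomatic
-- what changed: B replaces A's two index-based digit-scanning while-loops with slice-and-lstrip arithmetic: it slices text[index:text_len] once and measures the digit runs with len(s) - len(s.lstrip('0123456789')), deriving the token kind and end index from those lengths.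
-- intended difference: When is_in_inukshuk is true, 0 <= text_len <= index < len(text) and text[index] is a digit, A returns (7, index+1) because it reads text[index] before checking the text_len bound, while B returns None, the intended value for a lexer asked to scan at or past its end bound. — e.g. on rule_number("7", 0, 0, true): A returns some (7, 1), B returns none
-- outside the precondition, e.g. on rule_number('77', -1, 2, True): A returns (7, 2), B returns (7, 0); on rule_number('777', 0, -1, True): A returns (7, 1), B returns (7, 2); on rule_number('a7', -1, 2, True): A returns (7, 0), B returns (7, 0)
import Mathlib
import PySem

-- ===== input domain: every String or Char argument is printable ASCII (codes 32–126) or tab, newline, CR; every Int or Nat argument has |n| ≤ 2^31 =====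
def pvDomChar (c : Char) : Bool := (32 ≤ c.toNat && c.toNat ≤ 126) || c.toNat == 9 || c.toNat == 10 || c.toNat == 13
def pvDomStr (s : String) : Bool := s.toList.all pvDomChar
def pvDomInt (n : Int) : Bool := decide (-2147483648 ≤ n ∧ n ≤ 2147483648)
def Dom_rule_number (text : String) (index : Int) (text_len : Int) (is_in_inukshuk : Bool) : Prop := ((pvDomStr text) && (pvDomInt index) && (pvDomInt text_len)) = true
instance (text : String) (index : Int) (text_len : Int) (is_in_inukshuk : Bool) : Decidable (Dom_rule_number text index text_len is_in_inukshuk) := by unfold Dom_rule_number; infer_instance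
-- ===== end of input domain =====

-- B changes the decomposition: slice once, measure the digit runs with lstrip-length arithmetic (no index loops); same cost.

-- ===== PORT A =====

-- `48 <= ord(c) <= 57`, the digit test A performs on code points
def pvIsDig (c : Char) : Bool := 48 ≤ c.toNat && c.toNat ≤ 57

-- A's `while index < text_len: o = ord(text[index]); if not digit: break; index += 1`
-- (on an out-of-range read, where Python would raise IndexError, the loop stops; Pre_ keeps reads in range)
-- (structural recursion on the exact remaining length (text_len - index).toNat, so the kernel can evaluate it)
def pvScanFuel : Nat → List Char → Int → Int → Int
  | 0, _, index, _ => index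
  | fuel + 1, cs, index, text_len =>
    if index < text_len then
      match PySem.List.pyGet? cs index with
      | some c => if pvIsDig c then pvScanFuel fuel cs (index + 1) text_len else index
      | none => index
    else index

def pvScan (cs : List Char) (index : Int) (text_len : Int) : Int :=
  pvScanFuel (text_len - index).toNat cs index text_len

def rule_number (text : String) (index : Int) (text_len : Int) (is_in_inukshuk : Bool) : Option (Int × Int) :=
  if is_in_inukshuk then
    match PySem.List.pyGet? text.toList index with   -- o = ord(text[index]); none = IndexError, excluded by Pre_
    | none => none
    | some c =>
      if pvIsDig c then
        let i1 := pvScan text.toList (index + 1) text_len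
        if i1 < text_len - 1 ∧ PySem.List.pyGet? text.toList i1 = some '.' then
          match PySem.List.pyGet? text.toList (i1 + 1) with  -- after_dot = ord(text[index+1]); in range whenever i1+1 < text_len ≤ len
          | some d =>
            if pvIsDig d then some (8, pvScan text.toList (i1 + 1) text_len)
            else some (7, i1)
          | none => some (7, i1)
        else some (7, i1)
      else none
  else none

-- ===== PORT B =====

def pvDigits : List Char := "0123456789".toList

-- `len(s) - len(s.lstrip('0123456789'))`; lstrip(chars) removes the leading run of chars, exactly List.dropWhile (· ∈ chars)
def pvDigRun (s : List Char) : Int :=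
  (s.length : Int) - ((s.dropWhile (fun c => pvDigits.contains c)).length : Int)

def rule_number_alt (text : String) (index : Int) (text_len : Int) (is_in_inukshuk : Bool) : Option (Int × Int) :=
  if is_in_inukshuk then
    let s := PySem.List.slice text.toList (some index) (some text_len)
    let d1 := pvDigRun s
    if d1 = 0 then none
    else
      let rest := PySem.List.slice s (some d1) none
      if PySem.List.slice rest none (some 1) = ['.'] then
        let tail := PySem.List.slice rest (some 1) none
        let d2 := pvDigRun tail
        if d2 > 0 then some (8, index + d1 + 1 + d2)
        else some (7, index + d1)
      else some (7, index + d1)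
  else none

-- ===== PRECONDITION & SPEC =====

-- Pre_ excludes negative or out-of-range index and negative or oversize text_len: those are outside the lexer's
-- natural domain (A raises IndexError on out-of-range reads there, and otherwise its value comes from Python's
-- negative-index / negative-slice wraparound, which neither program specifies).
def Pre_rule_number (text : String) (index : Int) (text_len : Int) (is_in_inukshuk : Bool) : Prop :=
  is_in_inukshuk = true → (0 ≤ index ∧ index < text.toList.length ∧ 0 ≤ text_len ∧ text_len ≤ text.toList.length)
instance (text : String) (index : Int) (text_len : Int) (is_in_inukshuk : Bool) : Decidable (Pre_rule_number text index text_len is_in_inukshuk) := by unfold Pre_rule_number; infer_instance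

def pvWitness_rule_number : String × Int × Int × Bool := ("12.5x", 0, 5, true)

-- When is_in_inukshuk is true, text_len ≤ index and text[index] is a digit, A returns (7, index+1) because it reads
-- text[index] before checking the text_len bound, while B returns None, the intended value for a lexer asked to scan
-- at or past its end bound.
def D_rule_number (text : String) (index : Int) (text_len : Int) (is_in_inukshuk : Bool) : Prop :=
  is_in_inukshuk = true ∧ text_len ≤ index ∧ (PySem.List.pyGet? text.toList index).map pvIsDig = some true
instance (text : String) (index : Int) (text_len : Int) (is_in_inukshuk : Bool) : Decidable (D_rule_number text index text_len is_in_inukshuk) := by unfold D_rule_number; infer_instance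

def Spec_rule_number (text : String) (index : Int) (text_len : Int) (is_in_inukshuk : Bool) (out : Option (Int × Int)) : Prop := ¬ D_rule_number text index text_len is_in_inukshuk → out = rule_number_alt text index text_len is_in_inukshuk
instance (text : String) (index : Int) (text_len : Int) (is_in_inukshuk : Bool) (out : Option (Int × Int)) : Decidable (Spec_rule_number text index text_len is_in_inukshuk out) := by unfold Spec_rule_number; infer_instance

def pvDiffWitness_rule_number : String × Int × Int × Bool := ("7", 0, 0, true)
def pvDiffWitnessOut_rule_number : (Option (Int × Int)) × (Option (Int × Int)) := (some (7, 1), none)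

-- ===== CLAIM (what is proved, stated in full; the proofs are below) =====
def Claim_unchanged_rule_number : Prop := ∀ (text : String) (index : Int) (text_len : Int) (is_in_inukshuk : Bool), Dom_rule_number text index text_len is_in_inukshuk → Pre_rule_number text index text_len is_in_inukshuk → Spec_rule_number text index text_len is_in_inukshuk (rule_number text index text_len is_in_inukshuk)
def Claim_changed_rule_number : Prop := Dom_rule_number (pvDiffWitness_rule_number.1) (pvDiffWitness_rule_number.2.1) (pvDiffWitness_rule_number.2.2.1) (pvDiffWitness_rule_number.2.2.2) ∧ Pre_rule_number (pvDiffWitness_rule_number.1) (pvDiffWitness_rule_number.2.1) (pvDiffWitness_rule_number.2.2.1) (pvDiffWitness_rule_number.2.2.2) ∧ D_rule_number (pvDiffWitness_rule_number.1) (pvDiffWitness_rule_number.2.1) (pvDiffWitness_rule_number.2.2.1) (pvDiffWitness_rule_number.2.2.2) ∧ rule_number (pvDiffWitness_rule_number.1) (pvDiffWitness_rule_number.2.1) (pvDiffWitness_rule_number.2.2.1) (pvDiffWitness_rule_number.2.2.2) = pvDiffWitnessOut_rule_number.1 ∧ rule_number_alt (pvDiffWitness_rule_number.1) (pvDiffWitness_rule_number.2.1)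 (pvDiffWitness_rule_number.2.2.1) (pvDiffWitness_rule_number.2.2.2) = pvDiffWitnessOut_rule_number.2 ∧ pvDiffWitnessOut_rule_number.1 ≠ pvDiffWitnessOut_rule_number.2
def Claim_exact_rule_number : Prop := ∀ (text : String) (index : Int) (text_len : Int) (is_in_inukshuk : Bool), Dom_rule_number text index text_len is_in_inukshuk → Pre_rule_number text index text_len is_in_inukshuk → D_rule_number text index text_len is_in_inukshuk → rule_number text index text_len is_in_inukshuk ≠ rule_number_alt text index text_len is_in_inukshuk

-- ===== LEMMAS AND PROOFS =====

theorem pv_char_eq_iff (c d : Char) : c = d ↔ c.toNat = d.toNat :=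
  ⟨congrArg _, fun h => Char.ext (UInt32.toNat_inj.mp h)⟩

-- membership in '0123456789' is exactly A's code-point test
theorem pv_contains_digits (c : Char) : pvDigits.contains c = pvIsDig c := by
  have h : pvDigits = ['0','1','2','3','4','5','6','7','8','9'] := by decide
  rw [h, pvIsDig, Bool.eq_iff_iff]
  simp only [List.contains_eq_mem, List.mem_cons, List.not_mem_nil, or_false,
    pv_char_eq_iff, Bool.and_eq_true, decide_eq_true_eq]
  have e0 : ('0' : Char).toNat = 48 := rfl
  have e1 : ('1' : Char).toNat = 49 := rfl
  have e2 : ('2' : Char).toNat = 50 := rfl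
  have e3 : ('3' : Char).toNat = 51 := rfl
  have e4 : ('4' : Char).toNat = 52 := rfl
  have e5 : ('5' : Char).toNat = 53 := rfl
  have e6 : ('6' : Char).toNat = 54 := rfl
  have e7 : ('7' : Char).toNat = 55 := rfl
  have e8 : ('8' : Char).toNat = 56 := rfl
  have e9 : ('9' : Char).toNat = 57 := rfl
  rw [e0, e1, e2, e3, e4, e5, e6, e7, e8, e9]
  omega

-- B's lstrip-length arithmetic measures the leading digit run
theorem pv_run_eq (s : List Char) : pvDigRun s = ((s.takeWhile pvIsDig).length : Int) := by
  have hdw : s.dropWhile (fun c => pvDigits.contains c) = s.dropWhile pvIsDig := by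
    simp only [pv_contains_digits]
  rw [pvDigRun, hdw]
  have h := congrArg List.length (List.takeWhile_append_dropWhile (p := pvIsDig) (l := s))
  rw [List.length_append] at h
  omega

-- A's digit loop lands at the start index plus the digit run of the scanned window
theorem pv_scan_eq (fuel : Nat) : ∀ (cs : List Char) (i t : Int), 0 ≤ i → t ≤ (cs.length : Int) →
    (t - i).toNat = fuel →
    pvScanFuel fuel cs i t = i + (((cs.drop i.toNat).take fuel).takeWhile pvIsDig).length := by
  induction fuel with
  | zero => intro cs i t h0 hl hf; simp [pvScanFuel]
  | succ n ih =>
    intro cs i t h0 hl hf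
    have hit : i < t := by omega
    have hiL : i.toNat < cs.length := by omega
    rw [pvScanFuel, if_pos hit, PySem.List.pyGet?_eq_some_getElem cs h0 (by omega)]
    have hdrop : cs.drop i.toNat = cs[i.toNat] :: cs.drop (i.toNat + 1) :=
      List.drop_eq_getElem_cons hiL
    rw [hdrop, List.take_succ_cons, List.takeWhile_cons]
    cases hdig : pvIsDig cs[i.toNat] with
    | false => simp [hdig]
    | true =>
      simp only [hdig, if_true]
      rw [ih cs (i + 1) t (by omega) hl (by omega)]
      have h1 : (i + 1).toNat = i.toNat + 1 := by omega
      rw [h1, List.length_cons]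
      push_cast
      ring

-- length of a takeWhile prefix is at most the list length
theorem pv_takeWhile_len_le (s : List Char) : (s.takeWhile pvIsDig).length ≤ s.length := by
  have h := congrArg List.length (List.takeWhile_append_dropWhile (p := pvIsDig) (l := s))
  rw [List.length_append] at h
  omega

-- evaluation of B's port on a true flag, with the slices spelled out as drop/take
theorem pv_alt_eval (text : String) (index text_len : Int) (hi0 : 0 ≤ index) (ht0 : 0 ≤ text_len)
    (sN : List Char) (hs : sN = (text.toList.drop index.toNat).take (text_len.toNat - index.toNat)) :
    rule_number_alt text index text_len true =
      (if (sN.takeWhile pvIsDig).length = 0 then none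
       else if (sN.drop (sN.takeWhile pvIsDig).length).take 1 = ['.'] then
         if 0 < (((sN.drop (sN.takeWhile pvIsDig).length).drop 1).takeWhile pvIsDig).length
         then some (8, index + ((sN.takeWhile pvIsDig).length : Int) + 1 +
                (((sN.drop (sN.takeWhile pvIsDig).length).drop 1).takeWhile pvIsDig).length)
         else some (7, index + ((sN.takeWhile pvIsDig).length : Int))
       else some (7, index + ((sN.takeWhile pvIsDig).length : Int))) := by
  have hsl : PySem.List.slice text.toList (some index) (some text_len) = sN := by
    rw [PySem.List.slice_toNat text.toList hi0 ht0, hs]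
  rw [rule_number_alt, if_pos rfl]
  simp only [hsl, pv_run_eq]
  have hd1 : PySem.List.slice sN (some ((sN.takeWhile pvIsDig).length : Int)) none
      = sN.drop (sN.takeWhile pvIsDig).length := by
    rw [PySem.List.slice_from sN (Int.natCast_nonneg _), Int.toNat_natCast]
  have hrest1 : PySem.List.slice (sN.drop (sN.takeWhile pvIsDig).length) none (some 1)
      = (sN.drop (sN.takeWhile pvIsDig).length).take 1 := by
    rw [PySem.List.slice_to _ (by norm_num)]
    rfl
  have htail : PySem.List.slice (sN.drop (sN.takeWhile pvIsDig).length) (some 1) none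
      = (sN.drop (sN.takeWhile pvIsDig).length).drop 1 := by
    rw [PySem.List.slice_from _ (by norm_num)]
    rfl
  simp only [hd1, hrest1, htail, Nat.cast_eq_zero, Nat.cast_pos]

-- ===== VERDICT (by name: the statement is the Claim_ definition above) =====
theorem rule_number_spec : Claim_unchanged_rule_number := by
  intro text index text_len inuk _hdom hpre hnd
  cases inuk with
  | false => rfl
  | true =>
    obtain ⟨hi0, hiL, ht0, htL⟩ := hpre rfl
    have hget : PySem.List.pyGet? text.toList index = some text.toList[index.toNat] :=
      PySem.List.pyGet?_eq_some_getElem text.toList hi0 hiL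
    have hB := pv_alt_eval text index text_len hi0 ht0
      ((text.toList.drop index.toNat).take (text_len.toNat - index.toNat)) rfl
    cases hdig : pvIsDig text.toList[index.toNat] with
    | false =>
      -- A returns None; B's leading digit run is empty
      have hA : rule_number text index text_len true = none := by
        rw [rule_number, if_pos rfl, hget]
        simp [hdig]
      have hd1 : ((((text.toList.drop index.toNat).take (text_len.toNat - index.toNat))).takeWhile pvIsDig).length = 0 := by
        rcases Nat.eq_zero_or_pos (text_len.toNat - index.toNat) with h0 | hpos
        · rw [h0, List.take_zero]; rfl
        · have hdrop : text.toList.drop index.toNat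
              = text.toList[index.toNat] :: text.toList.drop (index.toNat + 1) :=
            List.drop_eq_getElem_cons (by omega)
          obtain ⟨k, hk⟩ : ∃ k, text_len.toNat - index.toNat = k + 1 := ⟨_, (Nat.succ_pred_eq_of_pos hpos).symm⟩
          rw [hdrop, hk, List.take_succ_cons, List.takeWhile_cons, hdig]
          simp
      rw [hA, hB, if_pos hd1]
    | true =>
      -- not in D_, so index < text_len
      have hit : index < text_len := by
        by_contra hge
        exact hnd ⟨rfl, by omega, by rw [hget, Option.map_some, hdig]⟩
      -- the window and its split at the first character
      have hdrop : text.toList.drop index.toNat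
          = text.toList[index.toNat] :: text.toList.drop (index.toNat + 1) :=
        List.drop_eq_getElem_cons (by omega)
      obtain ⟨k, hk⟩ : ∃ k, text_len.toNat - index.toNat = k + 1 :=
        ⟨text_len.toNat - index.toNat - 1, by omega⟩
      have hkk : k = text_len.toNat - index.toNat - 1 := by omega
      have hsplit : (text.toList.drop index.toNat).take (text_len.toNat - index.toNat)
          = text.toList[index.toNat] :: (text.toList.drop (index.toNat + 1)).take (text_len.toNat - index.toNat - 1) := by
        conv_lhs => rw [hdrop, hk, List.take_succ_cons]
        rw [hkk]
      -- the digit run after the first digit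
      have hd1 : ((((text.toList.drop index.toNat).take (text_len.toNat - index.toNat))).takeWhile pvIsDig).length
          = ((((text.toList.drop (index.toNat + 1)).take (text_len.toNat - index.toNat - 1))).takeWhile pvIsDig).length + 1 := by
        rw [hsplit, List.takeWhile_cons, hdig, if_pos rfl, List.length_cons]
      set wN := ((((text.toList.drop (index.toNat + 1)).take (text_len.toNat - index.toNat - 1))).takeWhile pvIsDig).length with hwN
      have hw_le : wN ≤ text_len.toNat - index.toNat - 1 := by
        have h1 := pv_takeWhile_len_le ((text.toList.drop (index.toNat + 1)).take (text_len.toNat - index.toNat - 1))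
        rw [List.length_take, List.length_drop] at h1
        omega
      -- A's first loop
      have hscan : pvScan text.toList (index + 1) text_len = index + 1 + (wN : Int) := by
        rw [pvScan, pv_scan_eq ((text_len - (index + 1)).toNat) text.toList (index + 1) text_len
          (by omega) (by omega) rfl]
        have h1 : (index + 1).toNat = index.toNat + 1 := by omega
        have h2 : (text_len - (index + 1)).toNat = text_len.toNat - index.toNat - 1 := by omega
        rw [h1, h2]
      have hA : rule_number text index text_len true =
          (if index + 1 + (wN : Int) < text_len - 1 ∧
              PySem.List.pyGet? text.toList (index + 1 + (wN : Int)) = some '.' then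
            match PySem.List.pyGet? text.toList (index + 1 + (wN : Int) + 1) with
            | some d =>
              if pvIsDig d then some ((8 : Int), pvScan text.toList (index + 1 + (wN : Int) + 1) text_len)
              else some ((7 : Int), index + 1 + (wN : Int))
            | none => some ((7 : Int), index + 1 + (wN : Int))
          else some ((7 : Int), index + 1 + (wN : Int))) := by
        rw [rule_number, if_pos rfl, hget]
        simp only [hdig, if_true, hscan]
      -- the position after the digit run
      have hp_le : index.toNat + 1 + wN ≤ text_len.toNat := by omega
      have hrest : ((text.toList.drop index.toNat).take (text_len.toNat - index.toNat)).drop (wN + 1)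
          = (text.toList.drop (index.toNat + 1 + wN)).take (text_len.toNat - index.toNat - 1 - wN) := by
        rw [List.drop_take, List.drop_drop]
        have h1 : index.toNat + (wN + 1) = index.toNat + 1 + wN := by omega
        have h2 : text_len.toNat - index.toNat - (wN + 1) = text_len.toNat - index.toNat - 1 - wN := by omega
        rw [h1, h2]
      have hAcond0 : ¬((((text.toList.drop index.toNat).take (text_len.toNat - index.toNat))).takeWhile pvIsDig).length = 0 := by
        rw [hd1]; omega
      rw [hA, hB, if_neg hAcond0, hd1, hrest]
      rcases Nat.lt_or_ge (index.toNat + 1 + wN) text_len.toNat with hp | hp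
      · -- the run stops strictly inside the window
        have hpL : index.toNat + 1 + wN < text.toList.length := by omega
        have hdropp : text.toList.drop (index.toNat + 1 + wN)
            = text.toList[index.toNat + 1 + wN] :: text.toList.drop (index.toNat + 1 + wN + 1) :=
          List.drop_eq_getElem_cons hpL
        obtain ⟨m, hm⟩ : ∃ m, text_len.toNat - index.toNat - 1 - wN = m + 1 :=
          ⟨text_len.toNat - index.toNat - 1 - wN - 1, by omega⟩
        have hmm : m = text_len.toNat - index.toNat - wN - 2 := by omega
        have hsplit2 : (text.toList.drop (index.toNat + 1 + wN)).take (text_len.toNat - index.toNat - 1 - wN)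
            = text.toList[index.toNat + 1 + wN] :: (text.toList.drop (index.toNat + 1 + wN + 1)).take (text_len.toNat - index.toNat - wN - 2) := by
          conv_lhs => rw [hdropp, hm, List.take_succ_cons]
          rw [hmm]
        rw [hsplit2]
        have hgetp : PySem.List.pyGet? text.toList (index + 1 + (wN : Int))
            = some text.toList[index.toNat + 1 + wN] := by
          rw [PySem.List.pyGet?_of_nonneg _ (by omega),
            show (index + 1 + (wN : Int)).toNat = index.toNat + 1 + wN from by omega,
            List.getElem?_eq_getElem hpL]
        by_cases hdot : text.toList[index.toNat + 1 + wN] = '.'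
        · -- a dot follows the digit run
          rw [List.take_succ_cons, List.take_zero, hdot, if_pos rfl, List.drop_succ_cons, List.drop_zero]
          rcases Nat.lt_or_ge (index.toNat + 1 + wN + 1) text_len.toNat with hq | hq
          · -- at least one character after the dot, inside the bound
            have hqL : index.toNat + 1 + wN + 1 < text.toList.length := by omega
            have hdropq : text.toList.drop (index.toNat + 1 + wN + 1)
                = text.toList[index.toNat + 1 + wN + 1] :: text.toList.drop (index.toNat + 1 + wN + 2) :=
              List.drop_eq_getElem_cons hqL
            obtain ⟨r, hr⟩ : ∃ r, text_len.toNat - index.toNat - wN - 2 = r + 1 :=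
              ⟨text_len.toNat - index.toNat - wN - 3, by omega⟩
            have hrr : r = text_len.toNat - index.toNat - wN - 3 := by omega
            have hsplit3 : (text.toList.drop (index.toNat + 1 + wN + 1)).take (text_len.toNat - index.toNat - wN - 2)
                = text.toList[index.toNat + 1 + wN + 1] :: (text.toList.drop (index.toNat + 1 + wN + 2)).take (text_len.toNat - index.toNat - wN - 3) := by
              conv_lhs => rw [hdropq, hr, List.take_succ_cons]
              rw [hrr]
            have hgetq : PySem.List.pyGet? text.toList (index + 1 + (wN : Int) + 1)
                = some text.toList[index.toNat + 1 + wN + 1] := by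
              rw [PySem.List.pyGet?_of_nonneg _ (by omega),
                show (index + 1 + (wN : Int) + 1).toNat = index.toNat + 1 + wN + 1 from by omega,
                List.getElem?_eq_getElem hqL]
            have hAcond : index + 1 + (wN : Int) < text_len - 1 ∧
                PySem.List.pyGet? text.toList (index + 1 + (wN : Int)) = some '.' :=
              ⟨by omega, by rw [hgetp, hdot]⟩
            rw [if_pos hAcond, hgetq, hsplit3, List.takeWhile_cons]
            cases hd2 : pvIsDig text.toList[index.toNat + 1 + wN + 1] with
            | false =>
              simp only [hd2, Bool.false_eq_true, if_false, List.length_nil]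
              rw [if_neg (Nat.lt_irrefl 0)]
              simp only [Option.some.injEq, Prod.mk.injEq, true_and]
              push_cast
              ring
            | true =>
              have hscan2 : pvScan text.toList (index + 1 + (wN : Int) + 1) text_len
                  = index + 1 + (wN : Int) + 1 +
                    (((text.toList.drop (index.toNat + 1 + wN + 1)).take (text_len.toNat - index.toNat - wN - 2)).takeWhile pvIsDig).length := by
                rw [pvScan, pv_scan_eq ((text_len - (index + 1 + (wN : Int) + 1)).toNat) text.toList _ text_len
                  (by omega) (by omega) rfl]
                have h1 : (index + 1 + (wN : Int) + 1).toNat = index.toNat + 1 + wN + 1 := by omega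
                have h2 : (text_len - (index + 1 + (wN : Int) + 1)).toNat = text_len.toNat - index.toNat - wN - 2 := by omega
                rw [h1, h2]
              simp only [hd2, if_true, List.length_cons]
              rw [hscan2, hsplit3, List.takeWhile_cons]
              simp only [hd2, if_true, List.length_cons]
              rw [if_pos (Nat.succ_pos _)]
              simp only [Option.some.injEq, Prod.mk.injEq, true_and]
              push_cast
              ring
          · -- the dot is the last character of the window: not a float for either side
            have h0 : text_len.toNat - index.toNat - wN - 2 = 0 := by omega
            rw [h0, List.take_zero]
            have hAcond : ¬(index + 1 + (wN : Int) < text_len - 1 ∧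
                PySem.List.pyGet? text.toList (index + 1 + (wN : Int)) = some '.') := by
              rintro ⟨h1, -⟩; omega
            rw [if_neg hAcond, if_neg (show ¬(0 < (List.takeWhile pvIsDig ([] : List Char)).length) from by simp)]
            simp only [Option.some.injEq, Prod.mk.injEq, true_and]
            push_cast
            ring
        · -- no dot after the digit run
          rw [List.take_succ_cons, List.take_zero]
          have hAcond : ¬(index + 1 + (wN : Int) < text_len - 1 ∧
              PySem.List.pyGet? text.toList (index + 1 + (wN : Int)) = some '.') := by
            rintro ⟨-, hc⟩; rw [hgetp, Option.some_inj] at hc; exact hdot hc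
          rw [if_neg hAcond, if_neg (show ¬([text.toList[index.toNat + 1 + wN]] = ['.']) from by simp [hdot])]
          simp only [Option.some.injEq, Prod.mk.injEq, true_and]
          push_cast
          ring
      · -- the digit run reaches the end of the window
        have h0 : text_len.toNat - index.toNat - 1 - wN = 0 := by omega
        rw [h0, List.take_zero, List.take_nil]
        have hAcond : ¬(index + 1 + (wN : Int) < text_len - 1 ∧
            PySem.List.pyGet? text.toList (index + 1 + (wN : Int)) = some '.') := by
          rintro ⟨h1, -⟩; omega
        rw [if_neg hAcond, if_neg (show ¬(([] : List Char) = ['.']) from by simp)]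
        simp only [Option.some.injEq, Prod.mk.injEq, true_and]
        push_cast
        ring

theorem rule_number_tight : Claim_exact_rule_number := by
  intro text index text_len inuk _hdom hpre hd
  obtain ⟨hinuk, hle, hdig⟩ := hd
  subst hinuk
  obtain ⟨hi0, hiL, ht0, htL⟩ := hpre rfl
  set cs := text.toList with hcs
  have hget : PySem.List.pyGet? cs index = some cs[index.toNat] :=
    PySem.List.pyGet?_eq_some_getElem cs hi0 hiL
  rw [hget, Option.map_some, Option.some_inj] at hdig
  -- A returns some (7, index + 1)
  have hfuel : (text_len - (index + 1)).toNat = 0 := by omega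
  have hA : rule_number text index text_len true = some (7, index + 1) := by
    rw [rule_number, if_pos rfl, hget]
    simp only [hdig, if_true, pvScan, hfuel, pvScanFuel]
    rw [if_neg (by omega)]
  -- B returns none
  have hslice : PySem.List.slice cs (some index) (some text_len) =
      (cs.drop index.toNat).take (text_len.toNat - index.toNat) :=
    PySem.List.slice_toNat cs hi0 ht0
  have hs0 : text_len.toNat - index.toNat = 0 := by omega
  have hB : rule_number_alt text index text_len true = none := by
    have h := pv_alt_eval text index text_len hi0 ht0 [] (by rw [hs0, List.take_zero])
    simpa using h
  rw [hA, hB]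
  simp

theorem rule_number_changed : Claim_changed_rule_number := by unfold Claim_changed_rule_number; decide
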